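-- pv_equiv track=rewrite | github.com/ZzinB/Algorithm_Study | 프로그래머스/2/42626. 더 맵게/더 맵게.py | solution
-- ===== SOURCE A (Python) =====
-- import heapq
--
-- def solution(scoville, K):
--     heapq.heapify(scoville)
--     cnt = 0
--     while scoville[0] < K:
--         if len(scoville) < 2:
--             return -1  # 모든 음식의 스코빌 지수를 K 이상으로 만들 수 없는 경우
--         # 가장 맵지 않은 두 음식을 꺼내서 섞음
--         first = heapq.heappop(scoville)
--         second = heapq.heappop(scoville)
--         mixed = first + (second * 2)
--         # 섞은 음식의 스코빌 지수를 힙에 추가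
--         heapq.heappush(scoville, mixed)
--         cnt += 1
--     return cnt
-- ===== SOURCE B (Python) =====
-- from collections import deque
--
-- def solution(scoville, K):
--     # Sort once, then merge two sorted streams: the sorted originals and a FIFO
--     # queue of mix results (which is always in non-decreasing order), so each
--     # minimum is taken from one of the two fronts in O(1) -- no heap, no reinsertion.
--     xs = sorted(scoville)
--     q = deque()
--     i = 0
--     n = len(xs)
--     cnt = 0
--     while True:
--         if i < n and (not q or xs[i] <= q[0]):
--             m = xs[i]
--         else:
--             m = q[0]
--         if m >= K:
--             return cnt
--         if (n - i) + len(q) < 2: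
--             return -1
--         if i < n and (not q or xs[i] <= q[0]):
--             a = xs[i]
--             i += 1
--         else:
--             a = q.popleft()
--         if i < n and (not q or xs[i] <= q[0]):
--             b = xs[i]
--             i += 1
--         else:
--             b = q.popleft()
--         q.append(a + 2 * b)
--         cnt += 1
-- ===== Notes on version B (the rewrite author's own statement) =====
-- stated objective: faster
-- what changed: Replaces the heap entirely with a sort-once two-queue merge: mixes go to a FIFO deque that provably stays in non-decreasing order, so each minimum is read off the fronts of the sorted array and the deque in O(1) instead of a per-operation heap sift.
import Mathlib
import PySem

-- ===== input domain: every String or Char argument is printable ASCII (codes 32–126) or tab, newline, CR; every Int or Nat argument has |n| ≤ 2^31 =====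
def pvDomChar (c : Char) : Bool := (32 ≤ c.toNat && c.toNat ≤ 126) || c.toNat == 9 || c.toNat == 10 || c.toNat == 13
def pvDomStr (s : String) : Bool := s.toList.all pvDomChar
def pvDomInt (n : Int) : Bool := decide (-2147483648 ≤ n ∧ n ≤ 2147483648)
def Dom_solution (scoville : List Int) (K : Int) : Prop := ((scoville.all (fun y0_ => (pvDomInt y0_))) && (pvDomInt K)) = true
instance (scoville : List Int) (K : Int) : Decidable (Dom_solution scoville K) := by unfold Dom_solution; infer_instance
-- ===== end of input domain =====

-- B replaces A's binary heap with a sort-once two-queue merge (FIFO queue of mixes).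
-- Equivalence is about the RETURN value only: A heap-orders the argument list in place,
-- B leaves the argument unchanged.

-- ===== PORT A =====
-- A's heapq calls are ported by their library contract: the heap is the multiset of its
-- elements, heap[0]/heappop yield its minimum, heappush adds an element (exact for the
-- returned value, which depends only on the popped minima).
def heapqLoop (K : Int) (heap : List Int) (cnt : Int) : Int :=
  match _hm : PySem.List.min? heap (fun y => y) with
  | none => cnt            -- heap empty: Python raises IndexError at scoville[0] (outside Pre_)
  | some m1 =>
    if m1 < K then
      if heap.length < 2 then -1
      else
        match hm2 : PySem.List.min? (heap.erase m1) (fun y => y) with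
        | none => cnt      -- unreachable: heap.length ≥ 2
        | some m2 =>
          heapqLoop K (((heap.erase m1).erase m2) ++ [m1 + m2 * 2]) (cnt + 1)
    else cnt
termination_by heap.length
decreasing_by
  have h1 : m1 ∈ heap := PySem.List.min?_mem _hm
  have h2 : m2 ∈ heap.erase m1 := PySem.List.min?_mem hm2
  have l1 := List.length_erase_of_mem h1
  have l2 := List.length_erase_of_mem h2
  simp only [List.length_append, List.length_cons, List.length_nil, l1, l2]
  omega

def solution (scoville : List Int) (K : Int) : Int :=
  heapqLoop K scoville 0   -- heapify: same multiset, heap-ordered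

-- ===== PORT B =====
-- Source B's `if i < n and (not q or xs[i] <= q[0]): m = xs[i] else: m = q[0]`
-- (peek the smaller of the two fronts; q[0] on two empty streams raises → none)
def peekMin (xs q : List Int) : Option Int :=
  match xs, q with
  | x :: _, [] => some x
  | x :: _, b :: _ => some (if x ≤ b then x else b)
  | [], b :: _ => some b
  | [], [] => none

-- the same front test followed by the pop (`i += 1` is consuming xs; `q.popleft()`);
-- the ([], []) case is unreachable behind the `(n - i) + len(q) < 2` guard
def takeMin (xs q : List Int) : Int × List Int × List Int :=
  match xs, q with
  | x :: xt, [] => (x, xt, [])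
  | x :: xt, b :: bt => if x ≤ b then (x, xt, b :: bt) else (b, x :: xt, bt)
  | [], b :: bt => (b, [], bt)
  | [], [] => (0, [], [])

theorem takeMin_length (xs q : List Int) (h : xs.length + q.length ≠ 0) :
    (takeMin xs q).2.1.length + (takeMin xs q).2.2.length + 1 = xs.length + q.length := by
  match xs, q with
  | x :: xt, [] => simp [takeMin]
  | x :: xt, b :: bt => simp only [takeMin]; split <;> simp <;> omega
  | [], b :: bt => simp [takeMin]
  | [], [] => simp at h

-- Source B's while-True loop; xs is the unread tail of the sorted array, q the deque
def mergeLoop (K : Int) (xs q : List Int) (cnt : Int) : Int :=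
  match peekMin xs q with
  | none => cnt            -- both streams empty: Python raises IndexError at q[0] (outside Pre_)
  | some m =>
    if K ≤ m then cnt
    else if xs.length + q.length < 2 then -1
    else
      let t1 :=takeMin xs q
      let t2 := takeMin t1.2.1 t1.2.2
      mergeLoop K t2.2.1 (t2.2.2 ++ [t1.1 + 2 * t2.1]) (cnt + 1)
termination_by xs.length + q.length
decreasing_by
  rename_i hlen
  have h1 : xs.length + q.length ≠ 0 := by omega
  have e1 := takeMin_length xs q h1
  have h2 : (takeMin xs q).2.1.length + (takeMin xs q).2.2.length ≠ 0 := by omega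
  have e2 := takeMin_length _ _ h2
  simp only [List.length_append, List.length_cons, List.length_nil]
  omega

def solution_alt (scoville : List Int) (K : Int) : Int :=
  mergeLoop K (PySem.List.sorted scoville (fun y => y) false) [] 0

-- ===== PRECONDITION & SPEC =====
-- Pre_ excludes only the empty list, on which A raises IndexError at scoville[0].
def Pre_solution (scoville : List Int) (_K : Int) : Prop := scoville ≠ []
instance (scoville : List Int) (K : Int) : Decidable (Pre_solution scoville K) := by unfold Pre_solution; infer_instance
def pvWitness_solution : List Int × Int := ([1, 2, 3, 9, 10, 12], 7)

def Spec_solution (scoville : List Int) (K : Int) (out : Int) : Prop := out = solution_alt scoville K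
instance (scoville : List Int) (K : Int) (out : Int) : Decidable (Spec_solution scoville K out) := by unfold Spec_solution; infer_instance

-- ===== CLAIM (what is proved, stated in full; the proofs are below) =====
def Claim_equal_solution : Prop := ∀ (scoville : List Int) (K : Int), Dom_solution scoville K → Pre_solution scoville K → Spec_solution scoville K (solution scoville K)

-- ===== LEMMAS AND PROOFS =====

-- the queue invariant: q is empty, or q = q₀ ++ [z] where z, the newest mix a+2b,
-- satisfies z ≤ 3β for β = that mix's b, and β bounds every other live element below
def QInv (xs q : List Int) : Prop :=
  q = [] ∨ ∃ q₀ z β, q = q₀ ++ [z] ∧ (∀ u ∈ xs ++ q₀, β ≤ u) ∧ z ≤ 3 * β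

theorem min?_eq_of_isMin {l : List Int} {a : Int} (hmem : a ∈ l)
    (hmin : ∀ z ∈ l, a ≤ z) : PySem.List.min? l (fun v => v) = some a := by
  cases hm : PySem.List.min? l (fun v => v) with
  | none =>
    have : l = [] := (PySem.List.min?_eq_none_iff _ _).mp hm
    subst this; simp at hmem
  | some m =>
    have h1 : m ∈ l := PySem.List.min?_mem hm
    have h2 : m ≤ a := PySem.List.min?_isMin hm a hmem
    exact congrArg some (le_antisymm (hmin m h1) h2).symm

theorem takeMin_perm (xs q : List Int) (h : xs.length + q.length ≠ 0) :
    (xs ++ q).Perm ((takeMin xs q).1 :: ((takeMin xs q).2.1 ++ (takeMin xs q).2.2)) := by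
  match xs, q with
  | x :: xt, [] => simp [takeMin]
  | x :: xt, b :: bt =>
    simp only [takeMin]; split
    · simp
    · show (x :: xt ++ b :: bt).Perm (b :: (x :: xt ++ bt))
      exact List.perm_middle
  | [], b :: bt => simp [takeMin]
  | [], [] => simp at h

theorem takeMin_isMin {xs q : List Int} (hxs : xs.Pairwise (· ≤ ·)) (hq : q.Pairwise (· ≤ ·))
    (h : xs.length + q.length ≠ 0) : ∀ u ∈ xs ++ q, (takeMin xs q).1 ≤ u := by
  match xs, q with
  | x :: xt, [] =>
    intro u hu
    rcases List.mem_append.mp hu with hu | hu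
    · rcases List.mem_cons.mp hu with rfl | hu
      · simp [takeMin]
      · simpa [takeMin] using (List.pairwise_cons.mp hxs).1 u hu
    · simp at hu
  | x :: xt, b :: bt =>
    intro u hu
    have hx := (List.pairwise_cons.mp hxs).1
    have hb := (List.pairwise_cons.mp hq).1
    simp only [takeMin]; split
    · rename_i hle
      rcases List.mem_append.mp hu with hu | hu
      · rcases List.mem_cons.mp hu with rfl | hu
        · simp
        · exact hx u hu
      · rcases List.mem_cons.mp hu with rfl | hu
        · exact hle
        · exact le_trans hle (hb u hu)
    · rename_i hnle
      have hbx : b ≤ x := le_of_not_ge hnle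
      rcases List.mem_append.mp hu with hu | hu
      · rcases List.mem_cons.mp hu with rfl | hu
        · exact hbx
        · exact le_trans hbx (hx u hu)
      · rcases List.mem_cons.mp hu with rfl | hu
        · simp
        · exact hb u hu
  | [], b :: bt =>
    intro u hu
    simp only [List.nil_append] at hu
    rcases List.mem_cons.mp hu with rfl | hu
    · simp [takeMin]
    · simpa [takeMin] using (List.pairwise_cons.mp hq).1 u hu
  | [], [] => simp at h

theorem takeMin_sorted_left {xs q : List Int} (hxs : xs.Pairwise (· ≤ ·)) :
    (takeMin xs q).2.1.Pairwise (· ≤ ·) := by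
  match xs, q with
  | x :: xt, [] => exact (List.pairwise_cons.mp hxs).2
  | x :: xt, b :: bt =>
    simp only [takeMin]; split
    · exact (List.pairwise_cons.mp hxs).2
    · exact hxs
  | [], b :: bt => simp [takeMin]
  | [], [] => simp [takeMin]

theorem takeMin_sorted_right {xs q : List Int} (hq : q.Pairwise (· ≤ ·)) :
    (takeMin xs q).2.2.Pairwise (· ≤ ·) := by
  match xs, q with
  | x :: xt, [] => simp [takeMin]
  | x :: xt, b :: bt =>
    simp only [takeMin]; split
    · exact hq
    · exact (List.pairwise_cons.mp hq).2
  | [], b :: bt => exact (List.pairwise_cons.mp hq).2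
  | [], [] => simp [takeMin]

-- takeMin pops the queue only at its front: the result queue is q or its tail
theorem takeMin_queue_shape (xs q : List Int) :
    (takeMin xs q).2.2 = q ∨ (takeMin xs q).2.2 = q.tail := by
  match xs, q with
  | x :: xt, [] => left; simp [takeMin]
  | x :: xt, b :: bt =>
    simp only [takeMin]; split
    · exact Or.inl rfl
    · exact Or.inr rfl
  | [], b :: bt => right; simp [takeMin]
  | [], [] => left; simp [takeMin]

-- takeMin's result left stream is a sublist of xs (it is xs or its tail)
theorem takeMin_left_shape (xs q : List Int) :
    (takeMin xs q).2.1 = xs ∨ (takeMin xs q).2.1 = xs.tail := by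
  match xs, q with
  | x :: xt, [] => right; simp [takeMin]
  | x :: xt, b :: bt =>
    simp only [takeMin]; split
    · exact Or.inr rfl
    · exact Or.inl rfl
  | [], b :: bt => left; simp [takeMin]
  | [], [] => left; simp [takeMin]

theorem peekMin_eq_takeMin (xs q : List Int) (h : xs.length + q.length ≠ 0) :
    peekMin xs q = some (takeMin xs q).1 := by
  match xs, q with
  | x :: xt, [] => simp [peekMin, takeMin]
  | x :: xt, b :: bt => simp only [peekMin, takeMin]; split <;> simp
  | [], b :: bt => simp [peekMin, takeMin]
  | [], [] => simp at h

-- a tail of a list whose elements are bounded below / whose last element is z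
theorem mem_tail_subset {l : List Int} {u : Int} (h : u ∈ l.tail) : u ∈ l := by
  cases l with
  | nil => simp at h
  | cons x t => exact List.mem_cons_of_mem x h

-- which stream the popped element came from: xs (queue untouched) or the queue front
theorem takeMin_src (xs q : List Int) (h : xs.length + q.length ≠ 0) :
    ((takeMin xs q).1 ∈ xs ∧ (takeMin xs q).2.2 = q ∧ (takeMin xs q).2.1 = xs.tail) ∨
    (q.head? = some (takeMin xs q).1 ∧ (takeMin xs q).2.2 = q.tail ∧ (takeMin xs q).2.1 = xs) := by
  match xs, q with
  | x :: xt, [] => left; simp [takeMin]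
  | x :: xt, b :: bt =>
    simp only [takeMin]; split
    · left; simp
    · right; simp
  | [], b :: bt => right; simp [takeMin]
  | [], [] => simp at h

theorem le_last_of_sorted {q₀ : List Int} {z₀ u : Int}
    (hs : (q₀ ++ [z₀]).Pairwise (· ≤ ·)) (hu : u ∈ q₀ ++ [z₀]) : u ≤ z₀ := by
  rcases List.mem_append.mp hu with hu | hu
  · exact (List.pairwise_append.mp hs).2.2 u hu z₀ (List.mem_singleton_self _)
  · simp at hu; omega

theorem mem_takeMin_left {xs q : List Int} {u : Int} (h : u ∈ (takeMin xs q).2.1) : u ∈ xs := by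
  rcases takeMin_left_shape xs q with he | he
  · rwa [he] at h
  · rw [he] at h; exact mem_tail_subset h

theorem loop_eq (K : Int) : ∀ (n : Nat) (l xs q : List Int) (cnt : Int),
    xs.length + q.length ≤ n → l.Perm (xs ++ q) →
    xs.Pairwise (· ≤ ·) → q.Pairwise (· ≤ ·) → QInv xs q →
    heapqLoop K l cnt = mergeLoop K xs q cnt := by
  intro n
  induction n with
  | zero =>
    intro l xs q cnt hlen hp _ _ _
    have hxs : xs = [] := List.eq_nil_of_length_eq_zero (by omega)
    have hq : q = [] := List.eq_nil_of_length_eq_zero (by omega)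
    subst hxs; subst hq
    have hl : l = [] := by simpa using hp.eq_nil
    subst hl
    rw [heapqLoop, mergeLoop]
    simp [PySem.List.min?, peekMin]
  | succ n ih =>
    intro l xs q cnt hlen hp hxs hq hinv
    by_cases hne : xs.length + q.length = 0
    · have hxs0 : xs = [] := List.eq_nil_of_length_eq_zero (by omega)
      have hq0 : q = [] := List.eq_nil_of_length_eq_zero (by omega)
      subst hxs0; subst hq0
      have hl : l = [] := by simpa using hp.eq_nil
      subst hl
      rw [heapqLoop, mergeLoop]
      simp [PySem.List.min?, peekMin]
    · -- the two fronts yield the overall minimum m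
      have hpk : peekMin xs q = some (takeMin xs q).1 := peekMin_eq_takeMin xs q hne
      have hperm1 : (xs ++ q).Perm ((takeMin xs q).1 :: ((takeMin xs q).2.1 ++ (takeMin xs q).2.2)) :=
        takeMin_perm xs q hne
      have hmin1 : ∀ u ∈ xs ++ q, (takeMin xs q).1 ≤ u := takeMin_isMin hxs hq hne
      have hmem1 : (takeMin xs q).1 ∈ xs ++ q := hperm1.symm.subset List.mem_cons_self
      have hminl : PySem.List.min? l (fun v => v) = some (takeMin xs q).1 :=
        min?_eq_of_isMin (hp.mem_iff.mpr hmem1) (fun z hz => hmin1 z (hp.subset hz))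
      rw [heapqLoop, hminl, mergeLoop, hpk]
      dsimp only
      by_cases hK : (takeMin xs q).1 < K
      · have hK' : ¬ K ≤ (takeMin xs q).1 := by omega
        rw [if_pos hK, if_neg hK']
        have hll : l.length = xs.length + q.length := by simpa using hp.length_eq
        by_cases h2 : xs.length + q.length < 2
        · rw [if_pos (by omega), if_pos h2]
        · rw [if_neg (by omega : ¬ l.length < 2), if_neg h2]
          -- erase the first minimum
          have hperase : (l.erase (takeMin xs q).1).Perm ((takeMin xs q).2.1 ++ (takeMin xs q).2.2) := by
            have h1 := (hp.trans hperm1).erase (takeMin xs q).1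
            simpa using h1
          have hs1l : (takeMin xs q).2.1.Pairwise (· ≤ ·) := takeMin_sorted_left hxs
          have hs1r : (takeMin xs q).2.2.Pairwise (· ≤ ·) := takeMin_sorted_right hq
          have hlen1 : (takeMin xs q).2.1.length + (takeMin xs q).2.2.length + 1 = xs.length + q.length :=
            takeMin_length xs q hne
          have hne1 : (takeMin xs q).2.1.length + (takeMin xs q).2.2.length ≠ 0 := by omega
          -- the second minimum
          have hperm2 := takeMin_perm (takeMin xs q).2.1 (takeMin xs q).2.2 hne1
          have hmin2 := takeMin_isMin hs1l hs1r hne1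
          have hmem2 := hperm2.symm.subset (List.mem_cons_self
            (a := (takeMin (takeMin xs q).2.1 (takeMin xs q).2.2).1))
          have hminl2 : PySem.List.min? (l.erase (takeMin xs q).1) (fun v => v)
              = some (takeMin (takeMin xs q).2.1 (takeMin xs q).2.2).1 :=
            min?_eq_of_isMin (hperase.mem_iff.mpr hmem2)
              (fun z hz => hmin2 z (hperase.subset hz))
          rw [hminl2]
          -- abbreviations for the second pop
          have hperase2 : ((l.erase (takeMin xs q).1).erase
              (takeMin (takeMin xs q).2.1 (takeMin xs q).2.2).1).Perm
              ((takeMin (takeMin xs q).2.1 (takeMin xs q).2.2).2.1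
                ++ (takeMin (takeMin xs q).2.1 (takeMin xs q).2.2).2.2) := by
            have h1 := (hperase.trans hperm2).erase (takeMin (takeMin xs q).2.1 (takeMin xs q).2.2).1
            simpa using h1
          -- every surviving element is ≥ the second minimum b
          have hge_b : ∀ u ∈ (takeMin (takeMin xs q).2.1 (takeMin xs q).2.2).2.1
              ++ (takeMin (takeMin xs q).2.1 (takeMin xs q).2.2).2.2,
              (takeMin (takeMin xs q).2.1 (takeMin xs q).2.2).1 ≤ u := by
            intro u hu
            exact hmin2 u (hperm2.symm.subset (List.mem_cons_of_mem _ hu))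
          have hm_le_b : (takeMin xs q).1 ≤ (takeMin (takeMin xs q).2.1 (takeMin xs q).2.2).1 :=
            hmin1 _ (hperm1.symm.subset (List.mem_cons_of_mem _ hmem2))
          -- queue elements surviving both pops are ≤ the new mix m + 2*b
          have hqle : ∀ z ∈ (takeMin (takeMin xs q).2.1 (takeMin xs q).2.2).2.2,
              z ≤ (takeMin xs q).1 + 2 * (takeMin (takeMin xs q).2.1 (takeMin xs q).2.2).1 := by
            intro z hz
            rcases hinv with hq0 | ⟨q₀, z₀, β, hqdec, hβ, hz3β⟩
            · -- empty queue: both result queues are empty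
              subst hq0
              have hq1 : (takeMin xs []).2.2 = ([] : List Int) := by
                rcases takeMin_queue_shape xs [] with h | h <;> simp [h]
              rw [hq1] at hz
              have hq2 : (takeMin (takeMin xs []).2.1 []).2.2 = ([] : List Int) := by
                rcases takeMin_queue_shape (takeMin xs []).2.1 [] with h | h <;> simp [h]
              rw [hq2] at hz
              simp at hz
            · -- q = q₀ ++ [z₀] with β ≤ every element of xs ++ q₀ and z₀ ≤ 3β
              -- z survives, so z ≤ z₀ (z₀ is the largest queue element)
              have hzq : z ∈ q := by
                rcases takeMin_queue_shape (takeMin xs q).2.1 (takeMin xs q).2.2 with h2 | h2 <;>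
                  rw [h2] at hz <;>
                  rcases takeMin_queue_shape xs q with h1 | h1
                · rw [h1] at hz; exact hz
                · rw [h1] at hz; exact mem_tail_subset hz
                · rw [h1] at hz; exact mem_tail_subset hz
                · rw [h1] at hz; exact mem_tail_subset (mem_tail_subset hz)
              have hzle : z ≤ z₀ := le_last_of_sorted (hqdec ▸ hq) (hqdec ▸ hzq)
              -- both popped values are ≥ β (the surviving z blocks popping z₀)
              have hβm : β ≤ (takeMin xs q).1 ∧ β ≤ (takeMin (takeMin xs q).2.1 (takeMin xs q).2.2).1 := by
                have hβxs : ∀ u ∈ xs, β ≤ u := fun u hu => hβ u (List.mem_append.mpr (Or.inl hu))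
                have hβq₀ : ∀ u ∈ q₀, β ≤ u := fun u hu => hβ u (List.mem_append.mpr (Or.inr hu))
                rcases takeMin_src xs q hne with ⟨hA1, hq1eq, hxs1eq⟩ | ⟨hB1, hq1eq, hxs1eq⟩ <;>
                  rcases takeMin_src (takeMin xs q).2.1 (takeMin xs q).2.2 hne1 with
                    ⟨hA2, hq2eq, _⟩ | ⟨hB2, hq2eq, _⟩
                · -- both from xs
                  exact ⟨hβxs _ hA1, hβxs _ (mem_takeMin_left hA2)⟩
                · -- first from xs, second from the queue front (queue untouched by pop 1)
                  refine ⟨hβxs _ hA1, ?_⟩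
                  cases q₀ with
                  | nil =>
                    -- queue was [z₀]; popping it empties q2, contradicting z ∈ q2
                    exfalso
                    rw [hq2eq, hq1eq, hqdec] at hz
                    simp at hz
                  | cons c q₀' =>
                    have hh : (takeMin xs q).2.2.head? = some c := by rw [hq1eq, hqdec]; simp
                    have hbc : c = (takeMin (takeMin xs q).2.1 (takeMin xs q).2.2).1 :=
                      Option.some.inj (hh.symm.trans hB2)
                    exact hbc ▸ hβq₀ c List.mem_cons_self
                · -- first from the queue front, second from xs
                  cases q₀ with
                  | nil =>
                    exfalso
                    rw [hq2eq, hq1eq, hqdec] at hz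
                    simp at hz
                  | cons c q₀' =>
                    have hh : q.head? = some c := by rw [hqdec]; simp
                    have hmc : c = (takeMin xs q).1 := Option.some.inj (hh.symm.trans hB1)
                    exact ⟨hmc ▸ hβq₀ c List.mem_cons_self, hβxs _ (mem_takeMin_left hA2)⟩
                · -- both from the queue front
                  cases q₀ with
                  | nil =>
                    exfalso
                    rw [hq2eq, hq1eq, hqdec] at hz
                    simp at hz
                  | cons c q₀' =>
                    have hh : q.head? = some c := by rw [hqdec]; simp
                    have hmc : c = (takeMin xs q).1 := Option.some.inj (hh.symm.trans hB1)
                    cases q₀' with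
                    | nil =>
                      exfalso
                      rw [hq2eq, hq1eq, hqdec] at hz
                      simp at hz
                    | cons d q₀'' =>
                      have hh2 : (takeMin xs q).2.2.head? = some d := by rw [hq1eq, hqdec]; simp
                      have hbd : d = (takeMin (takeMin xs q).2.1 (takeMin xs q).2.2).1 :=
                        Option.some.inj (hh2.symm.trans hB2)
                      exact ⟨hmc ▸ hβq₀ c List.mem_cons_self,
                        hbd ▸ hβq₀ d (List.mem_cons_of_mem c List.mem_cons_self)⟩
              omega
          -- recurse
          have hrec := ih (((l.erase (takeMin xs q).1).erase
              (takeMin (takeMin xs q).2.1 (takeMin xs q).2.2).1)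
              ++ [(takeMin xs q).1 + (takeMin (takeMin xs q).2.1 (takeMin xs q).2.2).1 * 2])
            (takeMin (takeMin xs q).2.1 (takeMin xs q).2.2).2.1
            ((takeMin (takeMin xs q).2.1 (takeMin xs q).2.2).2.2
              ++ [(takeMin xs q).1 + 2 * (takeMin (takeMin xs q).2.1 (takeMin xs q).2.2).1])
            (cnt + 1) ?_ ?_ ?_ ?_ ?_
          · exact hrec
          · have hlen2 := takeMin_length (takeMin xs q).2.1 (takeMin xs q).2.2 hne1
            simp only [List.length_append, List.length_cons, List.length_nil]
            omega
          · have h1 : ((takeMin xs q).1 + (takeMin (takeMin xs q).2.1 (takeMin xs q).2.2).1 * 2)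
                = ((takeMin xs q).1 + 2 * (takeMin (takeMin xs q).2.1 (takeMin xs q).2.2).1) := by ring
            rw [h1]
            refine (hperase2.append_right _).trans ?_
            rw [List.append_assoc]
          · exact takeMin_sorted_left hs1l
          · -- new queue q2 ++ [m + 2b] is sorted
            rw [List.pairwise_append]
            refine ⟨takeMin_sorted_right hs1r, by simp, ?_⟩
            intro z hz c hc
            simp only [List.mem_singleton] at hc
            subst hc
            exact hqle z hz
          · -- new invariant with β' = b
            right
            refine ⟨_, _, (takeMin (takeMin xs q).2.1 (takeMin xs q).2.2).1, rfl, hge_b, by omega⟩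
      · have hK' : K ≤ (takeMin xs q).1 := by omega
        rw [if_neg hK, if_pos hK']

-- ===== VERDICT (by name: the statement is the Claim_ definition above) =====
theorem solution_spec : Claim_equal_solution := by
  intro scoville K _ _
  unfold Spec_solution solution solution_alt
  refine loop_eq K scoville.length scoville _ [] 0 (by simp) ?_ ?_ ?_ ?_
  · simpa using (PySem.List.sorted_perm scoville (fun y => y) false).symm
  · exact PySem.List.sorted_pairwise scoville (fun y => y)
  · simp
  · left; rfl
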